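-- pv_equiv track=rewrite | github.com/alexwu727/leetcode_practice | array/0390EliminationGame.py | solution
-- ===== SOURCE A (Python) =====
-- def solution(test_case):
--     n = test_case
--
--     m = n
--     k = 1
--     start = 1
--     while m > 1:
--         if k % 2 == 1 or m % 2 == 1:
--             start += (1 << (k - 1))
--         m = m // 2
--         k += 1
--     return start
-- ===== SOURCE B (Python) =====
-- def solution(test_case):
--     # Recursive closed recurrence for the elimination game:
--     # f(n) = 2*(n//2 + 1 - f(n//2)), f(n) = 1 for n <= 1.
--     n = test_case
--     if n <= 1:
--         return 1
--     half = n // 2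
--     return 2 * (half + 1 - solution(half))
-- ===== Notes on version B (the rewrite author's own statement) =====
-- stated objective: simpler
-- what changed: Replaced A's iterative loop that maintains three state variables (remaining count m, pass counter k, tracked first element start, with a parity test deciding when start advances by 1<<(k-1)) by the classic two-line mirror-symmetry recursion f(n) = 2*(n//2 + 1 - f(n//2)) with base case n <= 1.
import Mathlib
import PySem

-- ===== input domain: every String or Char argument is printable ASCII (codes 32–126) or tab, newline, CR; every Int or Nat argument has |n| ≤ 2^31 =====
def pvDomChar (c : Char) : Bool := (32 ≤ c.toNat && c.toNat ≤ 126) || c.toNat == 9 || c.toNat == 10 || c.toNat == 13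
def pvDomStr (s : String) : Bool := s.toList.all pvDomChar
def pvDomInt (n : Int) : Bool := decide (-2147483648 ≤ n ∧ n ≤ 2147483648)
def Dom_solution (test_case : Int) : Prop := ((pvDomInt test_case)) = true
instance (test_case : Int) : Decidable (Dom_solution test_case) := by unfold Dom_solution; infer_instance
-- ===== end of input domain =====

-- B replaces A's three-variable while loop by the classic mirror-symmetry recursion
-- f(n) = 2*(n//2 + 1 - f(n//2)); objective: simpler.

-- ===== PORT A =====
-- the while loop of A: state (m, k, start); '1 << (k - 1)' ported as (1 : Int) <<< (k - 1).toNat,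
-- exact for k ≥ 1 (k starts at 1 and only increments, so the shift amount is never negative)
def solutionLoop (m k start : Int) : Int :=
  if h : m > 1 then
    solutionLoop (PySem.Int.floordiv m 2) (k + 1)
      (if PySem.Int.mod k 2 = 1 ∨ PySem.Int.mod m 2 = 1 then start + ((1 : Int) <<< (k - 1).toNat) else start)
  else start
termination_by m.toNat
decreasing_by
  have := PySem.Int.floordiv_eq_ediv_of_pos (a := m) (b := 2) (by omega)
  omega

def solution (test_case : Int) : Int :=
  solutionLoop test_case 1 1

-- ===== PORT B =====
def solution_alt (test_case : Int) : Int :=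
  if h : test_case ≤ 1 then 1
  else
    2 * (PySem.Int.floordiv test_case 2 + 1 - solution_alt (PySem.Int.floordiv test_case 2))
termination_by test_case.toNat
decreasing_by
  have := PySem.Int.floordiv_eq_ediv_of_pos (a := test_case) (b := 2) (by omega)
  omega

-- ===== PRECONDITION & SPEC =====
def Spec_solution (test_case : Int) (out : Int) : Prop := out = solution_alt test_case
instance (test_case : Int) (out : Int) : Decidable (Spec_solution test_case out) := by unfold Spec_solution; infer_instance

-- ===== CLAIM (what is proved, stated in full; the proofs are below) =====
def Claim_equal_solution : Prop := ∀ (test_case : Int), Dom_solution test_case → Spec_solution test_case (solution test_case)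

-- ===== LEMMAS AND PROOFS =====

-- position (1-based from the low end) of the survivor among m equally spaced remaining
-- elements, when the next pass runs left-to-right (dir = true) or right-to-left (dir = false)
def gPos (m : Int) (dir : Bool) : Int :=
  if h : m ≤ 1 then 1
  else if dir then 2 * gPos (PySem.Int.floordiv m 2) false
  else if PySem.Int.mod m 2 = 0 then 2 * gPos (PySem.Int.floordiv m 2) true - 1
  else 2 * gPos (PySem.Int.floordiv m 2) true
termination_by m.toNat
decreasing_by
  all_goals
    have := PySem.Int.floordiv_eq_ediv_of_pos (a := m) (b := 2) (by omega)
    omega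

theorem fd2_facts (m : Int) (h : 1 < m) :
    1 ≤ PySem.Int.floordiv m 2 ∧ (PySem.Int.floordiv m 2).toNat < m.toNat ∧
    2 * PySem.Int.floordiv m 2 + PySem.Int.mod m 2 = m ∧
    (PySem.Int.mod m 2 = 0 ∨ PySem.Int.mod m 2 = 1) := by
  have h1 := PySem.Int.floordiv_eq_ediv_of_pos (a := m) (b := 2) (by omega)
  have h2 := PySem.Int.mod_eq_emod_of_pos (a := m) (b := 2) (by omega)
  omega

theorem gPos_base (m : Int) (dir : Bool) (h : m ≤ 1) : gPos m dir = 1 := by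
  rw [gPos]; simp [h]

theorem gPos_true (m : Int) (h : ¬ m ≤ 1) :
    gPos m true = 2 * gPos (PySem.Int.floordiv m 2) false := by
  conv_lhs => rw [gPos]
  simp [h]

theorem gPos_false (m : Int) (h : ¬ m ≤ 1) :
    gPos m false = if PySem.Int.mod m 2 = 0 then 2 * gPos (PySem.Int.floordiv m 2) true - 1
      else 2 * gPos (PySem.Int.floordiv m 2) true := by
  conv_lhs => rw [gPos]
  simp [h]

-- mirror symmetry: the survivor of a right-to-left game is the reflection of the left-to-right one
theorem gPos_mirror : ∀ (N : Nat) (q : Int), q.toNat ≤ N → 1 ≤ q →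
    gPos q false = q + 1 - gPos q true := by
  intro N
  induction N with
  | zero =>
    intro q hN hq
    rw [gPos_base q false (by omega), gPos_base q true (by omega)]; omega
  | succ N ih =>
    intro q hN hq
    by_cases h1 : q ≤ 1
    · rw [gPos_base q false h1, gPos_base q true h1]; omega
    · obtain ⟨hfd1, hfdlt, hsum, hmod⟩ := fd2_facts q (by omega)
      have ihq := ih (PySem.Int.floordiv q 2) (by omega) hfd1
      rw [gPos_false q h1, gPos_true q h1, ihq]
      rcases hmod with hm0 | hm1
      · rw [if_pos hm0]; omega
      · rw [if_neg (by omega)]; omega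

theorem solution_alt_eq_gPos : ∀ (N : Nat) (n : Int), n.toNat ≤ N →
    solution_alt n = gPos n true := by
  intro N
  induction N with
  | zero =>
    intro n hN
    have h1 : n ≤ 1 := by omega
    rw [solution_alt, gPos_base n true h1]; simp [h1]
  | succ N ih =>
    intro n hN
    by_cases h1 : n ≤ 1
    · rw [solution_alt, gPos_base n true h1]; simp [h1]
    · obtain ⟨hfd1, hfdlt, hsum, hmod⟩ := fd2_facts n (by omega)
      rw [solution_alt]
      simp only [h1, dite_false]
      rw [ih (PySem.Int.floordiv n 2) (by omega), gPos_true n h1,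
          gPos_mirror N (PySem.Int.floordiv n 2) (by omega) hfd1]

theorem shift_one (n : Nat) : ((1 : Int) <<< n) = 2 ^ n := by
  rw [Int.shiftLeft_eq]; ring

theorem mod2_flip (k : Int) (hk : 1 ≤ k) :
    (PySem.Int.mod (k + 1) 2 = 1) ↔ ¬ (PySem.Int.mod k 2 = 1) := by
  have h1 := PySem.Int.mod_eq_emod_of_pos (a := k) (b := 2) (by omega)
  have h2 := PySem.Int.mod_eq_emod_of_pos (a := k + 1) (b := 2) (by omega)
  omega

theorem loop_done (m k start : Int) (h : ¬ m > 1) : solutionLoop m k start = start := by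
  rw [solutionLoop]; simp [h]

theorem loop_step (m k start : Int) (h : m > 1) :
    solutionLoop m k start =
      solutionLoop (PySem.Int.floordiv m 2) (k + 1)
        (if PySem.Int.mod k 2 = 1 ∨ PySem.Int.mod m 2 = 1 then start + ((1 : Int) <<< (k - 1).toNat) else start) := by
  conv_lhs => rw [solutionLoop]
  simp [h]

-- loop invariant: with step 2^(k-1) between the remaining elements and 'start' their first
-- one, the loop returns start + step * (survivor position - 1)
theorem solutionLoop_inv : ∀ (N : Nat) (m k start : Int), m.toNat ≤ N → 1 ≤ k →
    solutionLoop m k start =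
      start + 2 ^ (k - 1).toNat * (gPos m (decide (PySem.Int.mod k 2 = 1)) - 1) := by
  intro N
  induction N with
  | zero =>
    intro m k start hN hk
    rw [loop_done m k start (by omega), gPos_base m _ (by omega)]; ring
  | succ N ih =>
    intro m k start hN hk
    by_cases h1 : m > 1
    · obtain ⟨hfd1, hfdlt, hsum, hmod⟩ := fd2_facts m h1
      have hkk : ((k + 1) - 1).toNat = (k - 1).toNat + 1 := by omega
      rw [loop_step m k start h1, shift_one]
      have hflip := mod2_flip k hk
      by_cases hkodd : PySem.Int.mod k 2 = 1
      · -- left-to-right pass: start always advances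
        have hd2 : decide (PySem.Int.mod (k + 1) 2 = 1) = false :=
          decide_eq_false (by rw [hflip]; exact fun h => h hkodd)
        rw [if_pos (Or.inl hkodd), ih _ _ _ (by omega) (by omega), hkk, hd2,
            decide_eq_true hkodd, gPos_true m (by omega),
            gPos_mirror N (PySem.Int.floordiv m 2) (by omega) hfd1]
        ring
      · have hd2 : decide (PySem.Int.mod (k + 1) 2 = 1) = true :=
          decide_eq_true (hflip.mpr hkodd)
        rcases hmod with hm0 | hm1
        · -- right-to-left pass, m even: start unchanged
          rw [if_neg (by push_neg; exact ⟨hkodd, by omega⟩), ih _ _ _ (by omega) (by omega), hkk, hd2,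
              decide_eq_false hkodd, gPos_false m (by omega), if_pos hm0]
          ring
        · -- right-to-left pass, m odd: start advances
          rw [if_pos (Or.inr hm1), ih _ _ _ (by omega) (by omega), hkk, hd2,
              decide_eq_false hkodd, gPos_false m (by omega), if_neg (by omega)]
          ring
    · rw [loop_done m k start h1, gPos_base m _ (by omega)]; ring

-- ===== VERDICT (by name: the statement is the Claim_ definition above) =====
theorem solution_spec : Claim_equal_solution := by
  intro n _
  unfold Spec_solution solution
  rw [solutionLoop_inv n.toNat n 1 1 le_rfl (by omega),
      solution_alt_eq_gPos n.toNat n le_rfl,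
      show (decide (PySem.Int.mod 1 2 = 1)) = true from by decide]
  norm_num
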